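-- pv_equiv track=rewrite | github.com/qxz-coder/VersionSeek | ResponseProcessing/Elasticsearch/probe.py | not_valid_set
-- ===== SOURCE A (Python) =====
-- def compare_versions(version1, version2):
--
--     v1_parts = [int(v) for v in version1.split('.')]
--     v2_parts = [int(v) for v in version2.split('.')]
--
--
--     max_length = max(len(v1_parts), len(v2_parts))
--     v1_parts.extend([0] * (max_length - len(v1_parts)))
--     v2_parts.extend([0] * (max_length - len(v2_parts)))
--
--
--     for v1, v2 in zip(v1_parts, v2_parts):
--         if v1 > v2:
--             return 1
--         elif v1 < v2:
--             return -1
--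
--     return 0
--
-- def not_valid_set(vset,version):
--
--     version = version.split('_')[0] # 6.7.2_1 -> 6.7.2
--
--     small_flag = False
--     big_flag = False
--     for v in vset:
--         if compare_versions(v,version) > 0:
--             small_flag = True
--         if compare_versions(v,version) < 0:
--             big_flag = True
--
--     if small_flag and big_flag:
--         return True
--     return False
-- ===== SOURCE B (Python) =====
-- def not_valid_set(vset, version):
--     # Reduce the set to its lexicographic extremes after normalising every
--     # version to a tuple of ints padded with zeros to one common width, so
--     # Python's built-in tuple ordering is exactly the dotted-version order.
--     if not vset:
--         return False
--     target = [int(x) for x in version.split('_')[0].split('.')]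
--     keys = [[int(x) for x in v.split('.')] for v in vset]
--     width = max(len(k) for k in keys + [target])
--     def pad(p):
--         return tuple(p) + (0,) * (width - len(p))
--     t = pad(target)
--     padded = [pad(k) for k in keys]
--     return min(padded) < t < max(padded)
-- ===== Notes on version B (the rewrite author's own statement) =====
-- stated objective: alternative
-- what changed: B replaces A's per-element pad-and-compare flag loop by a normalise-then-order algorithm: every version is parsed once into an int tuple zero-padded to one common width, so Python's built-in tuple ordering is the version order; B then reduces the set to its min and max extremes and answers with the chained comparison min < target < max, never comparing individual pairs itself.
import Mathlib
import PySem

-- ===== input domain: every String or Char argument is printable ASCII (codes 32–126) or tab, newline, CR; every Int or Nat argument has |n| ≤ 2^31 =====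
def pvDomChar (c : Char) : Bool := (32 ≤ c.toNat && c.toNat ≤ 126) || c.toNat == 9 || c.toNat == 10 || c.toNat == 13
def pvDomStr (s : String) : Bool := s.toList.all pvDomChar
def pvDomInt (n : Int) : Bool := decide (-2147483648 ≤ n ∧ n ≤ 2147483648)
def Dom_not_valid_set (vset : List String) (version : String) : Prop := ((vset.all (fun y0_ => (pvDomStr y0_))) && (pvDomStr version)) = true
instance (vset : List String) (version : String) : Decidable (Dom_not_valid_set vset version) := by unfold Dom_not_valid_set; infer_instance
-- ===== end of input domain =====

-- B normalises every version once to a zero-padded int list of one common width, reduces the set to its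
-- lexicographic min/max extremes and compares only those to the target; objective: alternative algorithm.


-- [int(x) for x in s.split('.')] — shared by both Pythons verbatim; none = some part raises ValueError
def parseParts (s : String) : Option (List Int) :=
  ((PySem.Str.split? s ".").getD []).mapM PySem.Int.ofStr?

-- ===== PORT A =====
-- the 'for v1, v2 in zip(...)' loop of compare_versions
def cmpZip : List (Int × Int) → Int
  | [] => 0
  | (a, b) :: r => if a > b then 1 else if a < b then -1 else cmpZip r

-- compare_versions; none where the Python raises ValueError
def compareVersionsA (version1 version2 : String) : Option Int :=
  match parseParts version1, parseParts version2 with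
  | some p1, some p2 =>
      let maxLength := max p1.length p2.length
      some (cmpZip ((p1 ++ List.replicate (maxLength - p1.length) 0).zip
                    (p2 ++ List.replicate (maxLength - p2.length) 0)))
  | _, _ => none

def not_valid_set (vset : List String) (version : String) : Bool :=
  match vset.foldlM (fun (fl : Bool × Bool) v =>
      (compareVersionsA v (((PySem.Str.split? version "_").getD []).headD "")).map (fun c =>
        (if c > 0 then true else fl.1, if c < 0 then true else fl.2))) (false, false) with
  | some (small_flag, big_flag) => small_flag && big_flag
  | none => false

-- ===== PORT B =====
-- pad(p): tuple(p) + (0,) * (width - len(p))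
def padTo (w : Nat) (p : List Int) : List Int := p ++ List.replicate (w - p.length) 0

-- Python tuple '<' on int tuples
def lexLt : List Int → List Int → Bool
  | _, [] => false
  | [], _ :: _ => true
  | a :: p, b :: q => decide (a < b) || (decide (a = b) && lexLt p q)

def not_valid_set_alt (vset : List String) (version : String) : Bool :=
  if vset = [] then false
  else
    match parseParts (((PySem.Str.split? version "_").getD []).headD "") with
    | none => false
    | some target =>
      match vset.mapM parseParts with
      | none => false
      | some keys =>
        -- width = max(len(k) for k in keys + [target]): max of a nonempty list
        let width := match (keys ++ [target]).map List.length with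
                     | [] => 0
                     | l :: ls => ls.foldl Nat.max l
        let t := padTo width target
        match keys.map (padTo width) with
        | [] => false
        | k0 :: rest =>
          -- min(padded) / max(padded): Python's first-extremal fold
          let lo := rest.foldl (fun m k => if lexLt k m then k else m) k0
          let hi := rest.foldl (fun m k => if lexLt m k then k else m) k0
          lexLt lo t && lexLt t hi

-- ===== PRECONDITION & SPEC =====
-- every '.'-part of s is accepted by int()
def partsOK (s : String) : Bool :=
  ((PySem.Str.split? s ".").getD []).all (fun p => (PySem.Int.ofStr? p).isSome)

-- exactly where A returns: either vset is empty (the comparison loop never runs), or every version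
-- string involved parses (otherwise int() raises ValueError in A, and B raises there too)
def Pre_not_valid_set (vset : List String) (version : String) : Prop :=
  vset = [] ∨ (partsOK (((PySem.Str.split? version "_").getD []).headD "") = true
               ∧ vset.all partsOK = true)
instance (vset : List String) (version : String) : Decidable (Pre_not_valid_set vset version) := by
  unfold Pre_not_valid_set; infer_instance

def pvWitness_not_valid_set : List String × String := (["1.0", "3"], "2.0_1")

def Spec_not_valid_set (vset : List String) (version : String) (out : Bool) : Prop := out = not_valid_set_alt vset version
instance (vset : List String) (version : String) (out : Bool) : Decidable (Spec_not_valid_set vset version out) := by unfold Spec_not_valid_set; infer_instance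

-- ===== CLAIM (what is proved, stated in full; the proofs are below) =====
def Claim_equal_not_valid_set : Prop := ∀ (vset : List String) (version : String), Dom_not_valid_set vset version → Pre_not_valid_set vset version → Spec_not_valid_set vset version (not_valid_set vset version)

-- ===== LEMMAS AND PROOFS =====

-- A's padded comparison of two part-lists, phrased with padTo
def cmpPad (p q : List Int) : Int :=
  cmpZip ((padTo (max p.length q.length) p).zip (padTo (max p.length q.length) q))

theorem mapM_isSome_of_all {α β : Type} (f : α → Option β) :
    ∀ l : List α, (∀ a ∈ l, (f a).isSome) → ∃ t, l.mapM f = some t := by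
  intro l
  induction l with
  | nil => intro _; exact ⟨[], rfl⟩
  | cons a l ih =>
    intro h
    obtain ⟨b, hb⟩ := Option.isSome_iff_exists.mp (h a (by simp))
    obtain ⟨t, ht⟩ := ih (fun x hx => h x (by simp [hx]))
    exact ⟨b :: t, by simp [List.mapM_cons, hb, ht]⟩

theorem mapM_map_of_mapM {α β γ : Type} (f : α → Option β) (g : β → γ) :
    ∀ (l : List α) (ys : List β), l.mapM f = some ys →
      l.mapM (fun x => (f x).map g) = some (ys.map g) := by
  intro l
  induction l with
  | nil => intro ys h; simp at h; subst h; rfl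
  | cons a l ih =>
    intro ys h
    rw [List.mapM_cons] at h
    cases hfa : f a with
    | none => simp [hfa] at h
    | some b =>
      rw [hfa] at h
      cases hml : l.mapM f with
      | none => simp [hml] at h
      | some t =>
        rw [hml] at h
        simp at h
        subst h
        simp [List.mapM_cons, hfa, ih t hml]

theorem foldlM_eq_foldl {α : Type} (f : α → Option Int) (g : Bool × Bool → Int → Bool × Bool) :
    ∀ (l : List α) (cs : List Int) (init : Bool × Bool), l.mapM f = some cs →
      l.foldlM (fun fl v => (f v).map (g fl)) init = some (cs.foldl g init) := by
  intro l
  induction l with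
  | nil => intro cs init h; simp at h; subst h; rfl
  | cons a l ih =>
    intro cs init h
    rw [List.mapM_cons] at h
    cases hfa : f a with
    | none => simp [hfa] at h
    | some c =>
      rw [hfa] at h
      cases hml : l.mapM f with
      | none => simp [hml] at h
      | some t =>
        rw [hml] at h
        simp at h
        subst h
        simp [List.foldlM_cons, hfa, ih t (g init c) hml]

theorem flags_foldl (cs : List Int) : ∀ s0 b0 : Bool,
    cs.foldl (fun fl c => ((if c > 0 then true else fl.1), (if c < 0 then true else fl.2))) (s0, b0)
      = (s0 || cs.any (fun c => decide (c > 0)), b0 || cs.any (fun c => decide (c < 0))) := by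
  induction cs with
  | nil => intro s0 b0; simp
  | cons c cs ih =>
    intro s0 b0
    simp only [List.foldl_cons, List.any_cons]
    rw [ih]
    by_cases h1 : c > 0 <;> by_cases h2 : c < 0 <;> simp [h1, h2]

theorem partsOK_parse (s : String) (h : partsOK s = true) : ∃ t, parseParts s = some t := by
  unfold partsOK at h
  rw [List.all_eq_true] at h
  exact mapM_isSome_of_all _ _ h

theorem compareA_eq (ver : String) (t : List Int) (hvt : parseParts ver = some t) (v : String) :
    compareVersionsA v ver = (parseParts v).map (fun p => cmpPad p t) := by
  unfold compareVersionsA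
  rw [hvt]
  cases hp : parseParts v with
  | none => rfl
  | some p => simp [cmpPad, padTo]

-- cmpZip ignores a tail of (0,0) pairs
theorem cmpZip_append_zero (k : Nat) : ∀ l, cmpZip (l ++ List.replicate k ((0:Int), (0:Int))) = cmpZip l := by
  intro l
  induction l with
  | nil =>
    simp only [List.nil_append]
    induction k with
    | zero => rfl
    | succ k ih => simpa [List.replicate_succ, cmpZip] using ih
  | cons ab l ih =>
    obtain ⟨a, b⟩ := ab
    simp [cmpZip, ih]

-- padding both lists to any common width ≥ both lengths computes A's padded comparison
theorem cmp_padTo (p q : List Int) (w : Nat) (hw : max p.length q.length ≤ w) :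
    cmpZip ((padTo w p).zip (padTo w q)) = cmpPad p q := by
  unfold cmpPad
  set m := max p.length q.length with hm
  have hp : p.length ≤ m := le_max_left _ _
  have hq : q.length ≤ m := le_max_right _ _
  have hsplit : ∀ r : List Int, r.length ≤ m → padTo w r = padTo m r ++ List.replicate (w - m) 0 := by
    intro r hr
    unfold padTo
    rw [List.append_assoc, ← List.replicate_add]
    congr 2
    omega
  rw [hsplit p hp, hsplit q hq]
  have hlen : (padTo m p).length = (padTo m q).length := by
    unfold padTo; simp; omega
  rw [List.zip_append hlen, List.zip_replicate', cmpZip_append_zero]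

theorem cmpZip_swap : ∀ (a b : List Int), a.length = b.length →
    cmpZip (b.zip a) = - cmpZip (a.zip b) := by
  intro a
  induction a with
  | nil => intro b h; simp [cmpZip]
  | cons x p ih =>
    intro b h
    cases b with
    | nil => simp at h
    | cons y q =>
      simp only [List.length_cons, Nat.add_right_cancel_iff] at h
      simp only [List.zip_cons_cons, cmpZip]
      split_ifs <;> first | omega | exact ih q h

theorem lexLt_iff_cmp : ∀ (a b : List Int), a.length = b.length →
    lexLt a b = decide (cmpZip (a.zip b) < 0) := by
  intro a
  induction a with
  | nil => intro b h; cases b with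
    | nil => simp [lexLt, cmpZip]
    | cons y q => simp at h
  | cons x p ih =>
    intro b h
    cases b with
    | nil => simp at h
    | cons y q =>
      simp only [List.length_cons, Nat.add_right_cancel_iff] at h
      simp only [List.zip_cons_cons, cmpZip, lexLt]
      rcases lt_trichotomy x y with hlt | heq | hgt
      · simp [hlt, show ¬ x > y by omega]
      · subst heq
        simp only [show ¬ x > x by omega, if_false, decide_false, Bool.false_or,
          decide_true, Bool.true_and]
        exact ih q h
      · simp [hgt, show ¬ x < y by omega, show x ≠ y by omega]

theorem cmpZip_eq_zero : ∀ (a b : List Int), a.length = b.length →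
    cmpZip (a.zip b) = 0 → a = b := by
  intro a
  induction a with
  | nil => intro b h _; cases b with
    | nil => rfl
    | cons y q => simp at h
  | cons x p ih =>
    intro b h hz
    cases b with
    | nil => simp at h
    | cons y q =>
      simp only [List.length_cons, Nat.add_right_cancel_iff] at h
      simp only [List.zip_cons_cons, cmpZip] at hz
      by_cases hgt : x > y
      · rw [if_pos hgt] at hz; omega
      · rw [if_neg hgt] at hz
        by_cases hlt : x < y
        · rw [if_pos hlt] at hz; omega
        · rw [if_neg hlt] at hz
          have hxy : x = y := by omega
          rw [hxy, ih q h hz]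

theorem lexLt_trans : ∀ (a b c : List Int), lexLt a b = true → lexLt b c = true → lexLt a c = true := by
  intro a
  induction a with
  | nil =>
    intro b c hab hbc
    cases b with
    | nil => simp [lexLt] at hab
    | cons y q =>
      cases c with
      | nil => simp [lexLt] at hbc
      | cons z r => simp [lexLt]
  | cons x p ih =>
    intro b c hab hbc
    cases b with
    | nil => simp [lexLt] at hab
    | cons y q =>
      cases c with
      | nil => simp [lexLt] at hbc
      | cons z r =>
        simp only [lexLt, Bool.or_eq_true, Bool.and_eq_true, decide_eq_true_eq] at hab hbc ⊢
        rcases hab with h1 | ⟨h1, h1'⟩ <;> rcases hbc with h2 | ⟨h2, h2'⟩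
        · exact Or.inl (by omega)
        · exact Or.inl (by omega)
        · exact Or.inl (by omega)
        · exact Or.inr ⟨by omega, ih q r h1' h2'⟩

theorem lexLt_total (a b : List Int) (h : a.length = b.length)
    (h1 : lexLt a b = false) (h2 : lexLt b a = false) : a = b := by
  rw [lexLt_iff_cmp a b h] at h1
  rw [lexLt_iff_cmp b a h.symm, cmpZip_swap a b h] at h2
  simp only [decide_eq_false_iff_not, not_lt] at h1 h2
  exact cmpZip_eq_zero a b h (by omega)

theorem lexLt_foldl_max (w : Nat) (t : List Int) :
    ∀ (rest : List (List Int)) (m : List Int), m.length = w → (∀ k ∈ rest, k.length = w) →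
      lexLt t (rest.foldl (fun m k => if lexLt m k then k else m) m)
        = (lexLt t m || rest.any (fun k => lexLt t k)) := by
  intro rest
  induction rest with
  | nil => intro m _ _; simp
  | cons k rest ih =>
    intro m hm hall
    have hk : k.length = w := hall k (by simp)
    have hrest : ∀ k' ∈ rest, k'.length = w := fun k' hk' => hall k' (by simp [hk'])
    simp only [List.foldl_cons, List.any_cons]
    by_cases hmk : lexLt m k = true
    · rw [if_pos hmk, ih k hk hrest]
      have : (lexLt t m || lexLt t k) = lexLt t k := by
        cases htm : lexLt t m
        · simp
        · simp [lexLt_trans t m k htm hmk]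
      rw [← Bool.or_assoc, this]
    · rw [if_neg hmk, ih m hm hrest]
      have : (lexLt t m || lexLt t k) = lexLt t m := by
        cases htk : lexLt t k
        · simp
        · cases hkm : lexLt k m
          · have := lexLt_total k m (hk.trans hm.symm) hkm (by simpa using hmk)
            subst this
            simp [htk]
          · simp [lexLt_trans t k m htk hkm]
      rw [← Bool.or_assoc, this]

theorem foldl_min_lexLt (w : Nat) (t : List Int) :
    ∀ (rest : List (List Int)) (m : List Int), m.length = w → (∀ k ∈ rest, k.length = w) →
      lexLt (rest.foldl (fun m k => if lexLt k m then k else m) m) t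
        = (lexLt m t || rest.any (fun k => lexLt k t)) := by
  intro rest
  induction rest with
  | nil => intro m _ _; simp
  | cons k rest ih =>
    intro m hm hall
    have hk : k.length = w := hall k (by simp)
    have hrest : ∀ k' ∈ rest, k'.length = w := fun k' hk' => hall k' (by simp [hk'])
    simp only [List.foldl_cons, List.any_cons]
    by_cases hkm : lexLt k m = true
    · rw [if_pos hkm, ih k hk hrest]
      have : (lexLt m t || lexLt k t) = lexLt k t := by
        cases htm : lexLt m t
        · simp
        · simp [lexLt_trans k m t hkm htm]
      rw [← Bool.or_assoc, this]
    · rw [if_neg hkm, ih m hm hrest]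
      have : (lexLt m t || lexLt k t) = lexLt m t := by
        cases htk : lexLt k t
        · simp
        · cases hmk : lexLt m k
          · have := lexLt_total m k (hm.trans hk.symm) hmk (by simpa using hkm)
            subst this
            simp [htk]
          · simp [lexLt_trans m k t hmk htk]
      rw [← Bool.or_assoc, this]

theorem le_foldl_natmax : ∀ (ls : List Nat) (a x : Nat), (x = a ∨ x ∈ ls) → x ≤ ls.foldl Nat.max a := by
  intro ls
  induction ls with
  | nil =>
    intro a x h
    simp only [List.foldl_nil]
    rcases h with h | h
    · omega
    · simp at h
  | cons b ls ih =>
    intro a x h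
    simp only [List.foldl_cons]
    have hinit : Nat.max a b ≤ ls.foldl Nat.max (Nat.max a b) := ih _ _ (Or.inl rfl)
    rcases h with h | h
    · exact le_trans (h ▸ Nat.le_max_left a b) hinit
    · simp only [List.mem_cons] at h
      rcases h with h | h
      · exact le_trans (h ▸ Nat.le_max_right a b) hinit
      · exact ih (Nat.max a b) x (Or.inr h)

theorem any_congr_mem {α : Type} (l : List α) (f g : α → Bool)
    (h : ∀ x ∈ l, f x = g x) : l.any f = l.any g := by
  induction l with
  | nil => rfl
  | cons a l ih =>
    simp only [List.any_cons, h a (by simp), ih (fun x hx => h x (by simp [hx]))]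

theorem mapM_length {α β : Type} (f : α → Option β) :
    ∀ (l : List α) (ys : List β), l.mapM f = some ys → ys.length = l.length := by
  intro l
  induction l with
  | nil => intro ys h; simp at h; subst h; rfl
  | cons a l ih =>
    intro ys h
    rw [List.mapM_cons] at h
    cases hfa : f a with
    | none => simp [hfa] at h
    | some b =>
      rw [hfa] at h
      cases hml : l.mapM f with
      | none => simp [hml] at h
      | some t =>
        rw [hml] at h
        simp at h
        subst h
        simp [ih t hml]

theorem padTo_length (w : Nat) (p : List Int) (h : p.length ≤ w) : (padTo w p).length = w := by
  simp [padTo]; omega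

-- ===== VERDICT (by name: the statement is the Claim_ definition above) =====
theorem not_valid_set_spec : Claim_equal_not_valid_set := by
  intro vset version _ hpre
  unfold Spec_not_valid_set
  by_cases hv : vset = []
  · subst hv; rfl
  · rcases hpre with hnil | ⟨hver, hall⟩
    · exact absurd hnil hv
    obtain ⟨target, hvt⟩ := partsOK_parse _ hver
    rw [List.all_eq_true] at hall
    obtain ⟨keys, hkeys⟩ := mapM_isSome_of_all parseParts vset (fun a ha => by
      obtain ⟨t, ht⟩ := partsOK_parse a (hall a ha); simp [ht])
    obtain ⟨k0, ks, hk⟩ : ∃ k0 ks, keys = k0 :: ks := by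
      have hlen := mapM_length parseParts vset keys hkeys
      cases keys with
      | nil =>
        exfalso; apply hv
        cases vset with
        | nil => rfl
        | cons a l => simp at hlen
      | cons a l => exact ⟨a, l, rfl⟩
    subst hk
    -- the common width and its bounds
    set w : Nat := ((ks ++ [target]).map List.length).foldl Nat.max k0.length with hwdef
    have hbound : ∀ p, (p = k0 ∨ p ∈ ks ∨ p = target) → p.length ≤ w := by
      intro p hp
      apply le_foldl_natmax
      rcases hp with h | h | h
      · exact Or.inl (by rw [h])
      · exact Or.inr (by simp only [List.map_append, List.mem_append]; exact Or.inl (List.mem_map_of_mem h))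
      · exact Or.inr (by simp [h])
    have hwt : target.length ≤ w := hbound target (Or.inr (Or.inr rfl))
    -- pointwise: the two lex comparisons against the padded target are the signs of A's cmpPad
    have hlt1 : ∀ p, p.length ≤ w → lexLt (padTo w p) (padTo w target) = decide (cmpPad p target < 0) := by
      intro p hp
      rw [lexLt_iff_cmp _ _ (by rw [padTo_length w p hp, padTo_length w target hwt]),
        cmp_padTo p target w (by omega)]
    have hlt2 : ∀ p, p.length ≤ w → lexLt (padTo w target) (padTo w p) = decide (cmpPad p target > 0) := by
      intro p hp
      rw [lexLt_iff_cmp _ _ (by rw [padTo_length w p hp, padTo_length w target hwt]),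
        cmpZip_swap (padTo w p) (padTo w target) (by rw [padTo_length w p hp, padTo_length w target hwt]),
        cmp_padTo p target w (by omega)]
      exact decide_eq_decide.mpr (by omega)
    -- A's value: the two any-signs over cmpPad
    have hA : not_valid_set vset version
        = (((k0 :: ks).map (fun p => cmpPad p target)).any (fun c => decide (c > 0))
            && ((k0 :: ks).map (fun p => cmpPad p target)).any (fun c => decide (c < 0))) := by
      unfold not_valid_set
      have hfun : (fun (fl : Bool × Bool) v =>
            (compareVersionsA v (((PySem.Str.split? version "_").getD []).headD "")).map (fun c =>
              ((if c > 0 then true else fl.1), (if c < 0 then true else fl.2))))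
          = (fun (fl : Bool × Bool) v =>
            ((fun v => (parseParts v).map (fun p => cmpPad p target)) v).map (fun c =>
              ((if c > 0 then true else fl.1), (if c < 0 then true else fl.2)))) := by
        funext fl v
        rw [compareA_eq _ target hvt v]
      rw [hfun,
        foldlM_eq_foldl (fun v => (parseParts v).map (fun p => cmpPad p target))
          (fun fl c => ((if c > 0 then true else fl.1), (if c < 0 then true else fl.2))) vset _ (false, false)
          (mapM_map_of_mapM parseParts (fun p => cmpPad p target) vset _ hkeys),
        flags_foldl]
      simp
    -- B's value: the two any-lex comparisons against the padded target
    have hB : not_valid_set_alt vset version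
        = (((k0 :: ks).any (fun p => lexLt (padTo w p) (padTo w target)))
            && ((k0 :: ks).any (fun p => lexLt (padTo w target) (padTo w p)))) := by
      unfold not_valid_set_alt
      rw [if_neg hv]
      simp only [hvt, hkeys, List.cons_append, List.map_cons]
      rw [foldl_min_lexLt w (padTo w target) (ks.map (padTo w)) (padTo w k0)
            (padTo_length w k0 (hbound k0 (Or.inl rfl)))
            (by intro k hk
                obtain ⟨p, hp, rfl⟩ := List.mem_map.mp hk
                exact padTo_length w p (hbound p (Or.inr (Or.inl hp)))),
          lexLt_foldl_max w (padTo w target) (ks.map (padTo w)) (padTo w k0)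
            (padTo_length w k0 (hbound k0 (Or.inl rfl)))
            (by intro k hk
                obtain ⟨p, hp, rfl⟩ := List.mem_map.mp hk
                exact padTo_length w p (hbound p (Or.inr (Or.inl hp))))]
      simp [List.any_map, Function.comp_def]
    have hmem : ∀ p ∈ k0 :: ks, p.length ≤ w := by
      intro p hp
      rcases List.mem_cons.mp hp with h | h
      · exact hbound p (Or.inl h)
      · exact hbound p (Or.inr (Or.inl h))
    have e1 : (k0 :: ks).any (fun p => lexLt (padTo w p) (padTo w target))
        = (k0 :: ks).any (fun p => decide (cmpPad p target < 0)) :=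
      any_congr_mem _ _ _ (fun p hp => hlt1 p (hmem p hp))
    have e2 : (k0 :: ks).any (fun p => lexLt (padTo w target) (padTo w p))
        = (k0 :: ks).any (fun p => decide (cmpPad p target > 0)) :=
      any_congr_mem _ _ _ (fun p hp => hlt2 p (hmem p hp))
    rw [hA, hB, e1, e2]
    simp only [List.any_map, Function.comp_def]
    rw [Bool.and_comm]
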